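-- pv_equiv track=rewrite | github.com/THUSI-Lab/GameVerse | src/game_servers/snake/game/logic.py | spawn_food
-- ===== SOURCE A (Python) =====
-- from typing import List, Tuple, Optional
--
-- def spawn_food(
--     coords: List[Tuple[int, int]],
--     idx: int,
--     food: List[Tuple[int, int]],
--     food_attributes: List[List[Tuple[int, int]]],
--     lifespan: int = 10,
--     value: int = 1
-- ) -> Tuple[List[Tuple[int, int]], List[List[Tuple[int, int]]], int]:
--     """
--     Spawn a new food item on the board.
--
--     Args:
--         coords: List of available coordinates (shuffled)
--         idx: Current index in coords list
--         food: Current list of food positions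
--         food_attributes: 2D array of food attributes
--         lifespan: Food lifespan in turns
--         value: Food value (reward)
--
--     Returns:
--         Tuple of (updated food list, updated food attributes, new idx)
--     """
--     if idx >= len(coords):
--         # Wrap around if we've used all coords
--         idx = idx % len(coords) if coords else 0
--
--     x, y = coords[idx]
--     new_idx = idx + 1
--
--     # Check if position is already occupied by food
--     if (x, y) in food or food_attributes[x][y] != (0, 0):
--         # Try next position
--         if new_idx < len(coords):
--             return spawn_food(coords, new_idx, food, food_attributes, lifespan, value)
--         else:
--             # No available positions, return unchanged
--             return food, food_attributes, new_idx
--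
--     # Spawn food
--     new_food = food.copy()
--     new_food.append((x, y))
--
--     new_food_attributes = [row[:] for row in food_attributes]
--     new_food_attributes[x][y] = (lifespan, value)
--
--     return new_food, new_food_attributes, new_idx
-- ===== SOURCE B (Python) =====
-- def spawn_food(coords, idx, food, food_attributes, lifespan=10, value=1):
--     # Iterative scan with a precomputed occupancy set instead of tail recursion.
--     if idx >= len(coords):
--         idx = idx % len(coords) if coords else 0
--     occupied = set(food)
--     i = idx
--     while True:
--         x, y = coords[i]
--         i += 1
--         if (x, y) not in occupied and food_attributes[x][y] == (0, 0):
--             new_fa = [row[:] for row in food_attributes]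
--             new_fa[x][y] = (lifespan, value)
--             return food + [(x, y)], new_fa, i
--         if i >= len(coords):
--             return food, food_attributes, i
-- ===== Notes on version B (the rewrite author's own statement) =====
-- stated objective: idiomatic
-- what changed: Replaces A's tail recursion (which re-enters the whole function per occupied cell) with a single explicit scan loop over an occupancy set precomputed once from the food list.
import Mathlib
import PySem

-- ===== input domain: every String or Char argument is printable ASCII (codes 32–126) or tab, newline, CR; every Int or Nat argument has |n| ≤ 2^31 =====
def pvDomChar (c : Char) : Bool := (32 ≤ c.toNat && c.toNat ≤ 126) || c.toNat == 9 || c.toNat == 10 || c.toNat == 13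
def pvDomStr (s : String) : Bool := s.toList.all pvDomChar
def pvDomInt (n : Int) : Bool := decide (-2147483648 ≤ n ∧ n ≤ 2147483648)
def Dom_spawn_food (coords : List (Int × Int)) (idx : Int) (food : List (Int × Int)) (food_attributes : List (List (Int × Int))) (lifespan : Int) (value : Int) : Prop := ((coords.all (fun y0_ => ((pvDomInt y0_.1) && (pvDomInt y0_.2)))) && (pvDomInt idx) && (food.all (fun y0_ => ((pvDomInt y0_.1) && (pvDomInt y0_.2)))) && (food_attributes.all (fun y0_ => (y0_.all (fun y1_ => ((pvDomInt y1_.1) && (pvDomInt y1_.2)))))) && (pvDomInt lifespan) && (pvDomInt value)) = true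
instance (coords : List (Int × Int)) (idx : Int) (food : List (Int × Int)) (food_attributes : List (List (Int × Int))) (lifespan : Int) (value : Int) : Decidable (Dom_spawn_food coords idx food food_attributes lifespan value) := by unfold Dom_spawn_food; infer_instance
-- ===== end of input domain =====

-- B replaces A's tail recursion by an explicit loop over the coordinate scan with a precomputed
-- occupancy set (objective: idiomatic / alternative decomposition); return values agree on Pre_.


-- ===== PORT A =====
-- shared helper: Python's chained read `food_attributes[x][y]` (none = IndexError)
def cellAt (fa : List (List (Int × Int))) (x y : Int) : Option (Int × Int) :=
  (PySem.List.pyGet? fa x).bind (fun row => PySem.List.pyGet? row y)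

-- shared helper: `new[x][y] = v` after copying every row (both Pythons perform this same update)
def setCell (fa : List (List (Int × Int))) (x y : Int) (v : Int × Int) : List (List (Int × Int)) :=
  PySem.List.pySetD fa x (PySem.List.pySetD (PySem.List.pyGetD fa x []) y v)

def spawn_food (coords : List (Int × Int)) (idx : Int) (food : List (Int × Int)) (food_attributes : List (List (Int × Int))) (lifespan : Int) (value : Int) : (List (Int × Int)) × (List (List (Int × Int))) × Int :=
  let idx1 : Int := if idx ≥ (coords.length : Int) then (if coords ≠ [] then PySem.Int.mod idx (coords.length : Int) else 0) else idx
  match PySem.List.pyGet? coords idx1 with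
  | none => (food, food_attributes, 0)   -- Python raises IndexError here (outside Pre_)
  | some (x, y) =>
    let new_idx := idx1 + 1
    if (x, y) ∈ food ∨ cellAt food_attributes x y ≠ some (0, 0) then
      if new_idx < (coords.length : Int) then
        spawn_food coords new_idx food food_attributes lifespan value
      else (food, food_attributes, new_idx)
    else
      (food ++ [(x, y)], setCell food_attributes x y (lifespan, value), new_idx)
termination_by (if idx < (coords.length : Int) then (2 * (coords.length : Int) - idx).toNat else 2 * coords.length + 1)
decreasing_by
  rename_i hg
  simp only [new_idx, idx1] at hg
  simp_wf
  by_cases hpos : 0 < (coords.length : Int)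
  · have h1 : 0 ≤ PySem.Int.mod idx (coords.length : Int) := PySem.Int.mod_nonneg idx hpos
    have h2 : PySem.Int.mod idx (coords.length : Int) < (coords.length : Int) := PySem.Int.mod_lt idx hpos
    split_ifs at * <;> omega
  · have hnil : coords = [] := by cases coords with | nil => rfl | cons a l => exact absurd (by simp) hpos
    subst hnil
    split_ifs at * <;> first | omega | simp_all

-- ===== PORT B =====
-- B's while-loop, as a recursive helper advancing the scan index i
def spawnScanB (coords : List (Int × Int)) (occupied : PySem.Set (Int × Int)) (food : List (Int × Int)) (food_attributes : List (List (Int × Int))) (lifespan : Int) (value : Int) (i : Int) : (List (Int × Int)) × (List (List (Int × Int))) × Int :=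
  match PySem.List.pyGet? coords i with
  | none => (food, food_attributes, 0)   -- Python raises IndexError here (outside Pre_)
  | some (x, y) =>
    if ¬ (x, y) ∈ occupied ∧ cellAt food_attributes x y = some (0, 0) then
      (food ++ [(x, y)], setCell food_attributes x y (lifespan, value), i + 1)
    else if i + 1 ≥ (coords.length : Int) then
      (food, food_attributes, i + 1)
    else
      spawnScanB coords occupied food food_attributes lifespan value (i + 1)
termination_by ((coords.length : Int) - i).toNat
decreasing_by omega

def spawn_food_alt (coords : List (Int × Int)) (idx : Int) (food : List (Int × Int)) (food_attributes : List (List (Int × Int))) (lifespan : Int) (value : Int) : (List (Int × Int)) × (List (List (Int × Int))) × Int :=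
  let idx1 : Int := if idx ≥ (coords.length : Int) then (if coords ≠ [] then PySem.Int.mod idx (coords.length : Int) else 0) else idx
  spawnScanB coords (PySem.Set.ofList food) food food_attributes lifespan value idx1

-- ===== PRECONDITION & SPEC =====
-- the exact sequence of cells the Python scan visits, in order (negative start wraps from the end)
def scanSeq (coords : List (Int × Int)) (idx1 : Int) : List (Int × Int) :=
  if idx1 < 0 then coords.drop ((coords.length : Int) + idx1).toNat ++ coords else coords.drop idx1.toNat
-- Pre_ excludes exactly the inputs on which the Python raises IndexError: empty coords, idx below
-- -len(coords), or a scanned cell not in food whose attribute read food_attributes[x][y] is out of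
-- range occurring before the first free cell (cells after the first free cell are never read).
def Pre_spawn_food (coords : List (Int × Int)) (idx : Int) (food : List (Int × Int)) (food_attributes : List (List (Int × Int))) (lifespan : Int) (value : Int) : Prop :=
  coords ≠ [] ∧ -(coords.length : Int) ≤ idx ∧
  ∀ p ∈ (scanSeq coords (if idx ≥ (coords.length : Int) then PySem.Int.mod idx (coords.length : Int) else idx)).takeWhile
      (fun p => decide (p ∈ food) || decide (cellAt food_attributes p.1 p.2 ≠ some (0, 0))),
    p ∈ food ∨ (cellAt food_attributes p.1 p.2).isSome
instance (coords : List (Int × Int)) (idx : Int) (food : List (Int × Int)) (food_attributes : List (List (Int × Int))) (lifespan : Int) (value : Int) : Decidable (Pre_spawn_food coords idx food food_attributes lifespan value) := by unfold Pre_spawn_food; infer_instance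
def pvWitness_spawn_food : (List (Int × Int)) × Int × (List (Int × Int)) × (List (List (Int × Int))) × Int × Int := ([(0, 0), (0, 1)], 0, [(0, 0)], [[(0, 0), (0, 0)]], 10, 1)
def Spec_spawn_food (coords : List (Int × Int)) (idx : Int) (food : List (Int × Int)) (food_attributes : List (List (Int × Int))) (lifespan : Int) (value : Int) (out : (List (Int × Int)) × (List (List (Int × Int))) × Int) : Prop := out = spawn_food_alt coords idx food food_attributes lifespan value
instance (coords : List (Int × Int)) (idx : Int) (food : List (Int × Int)) (food_attributes : List (List (Int × Int))) (lifespan : Int) (value : Int) (out : (List (Int × Int)) × (List (List (Int × Int))) × Int) : Decidable (Spec_spawn_food coords idx food food_attributes lifespan value out) := by unfold Spec_spawn_food; infer_instance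

-- ===== CLAIM (what is proved, stated in full; the proofs are below) =====
def Claim_equal_spawn_food : Prop := ∀ (coords : List (Int × Int)) (idx : Int) (food : List (Int × Int)) (food_attributes : List (List (Int × Int))) (lifespan : Int) (value : Int), Dom_spawn_food coords idx food food_attributes lifespan value → Pre_spawn_food coords idx food food_attributes lifespan value → Spec_spawn_food coords idx food food_attributes lifespan value (spawn_food coords idx food food_attributes lifespan value)

-- ===== LEMMAS AND PROOFS =====
lemma scan_eq (coords : List (Int × Int)) (food : List (Int × Int)) (fa : List (List (Int × Int))) (ls v : Int) :
    ∀ (n : Nat) (i : Int), ((coords.length : Int) - i).toNat ≤ n → i < (coords.length : Int) →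
      spawn_food coords i food fa ls v = spawnScanB coords (PySem.Set.ofList food) food fa ls v i := by
  intro n
  induction n with
  | zero => intro i hfuel hhi; omega
  | succ n ih =>
    intro i hfuel hhi
    have hnge : ¬ i ≥ (coords.length : Int) := not_le.mpr hhi
    rw [spawn_food, spawnScanB]
    simp only [hnge, if_false]
    cases hp : PySem.List.pyGet? coords i with
    | none => rfl
    | some p =>
      obtain ⟨x, y⟩ := p
      simp only []
      by_cases hocc : (x, y) ∈ food ∨ cellAt fa x y ≠ some (0, 0)
      · have hnotfree : ¬ ((x, y) ∉ PySem.Set.ofList food ∧ cellAt fa x y = some (0, 0)) := by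
          rw [not_and_or, not_not, PySem.Set.mem_ofList]
          tauto
        rw [if_pos hocc, if_neg hnotfree]
        by_cases hlt : i + 1 < (coords.length : Int)
        · rw [if_pos hlt, if_neg (not_le.mpr hlt)]
          exact ih (i + 1) (by omega) hlt
        · rw [if_neg hlt, if_pos (not_lt.mp hlt)]
      · rw [not_or, not_not] at hocc
        have hfree : (x, y) ∉ PySem.Set.ofList food ∧ cellAt fa x y = some (0, 0) := by
          rw [PySem.Set.mem_ofList]
          exact hocc
        rw [if_neg (by tauto : ¬ ((x, y) ∈ food ∨ cellAt fa x y ≠ some (0, 0))), if_pos hfree]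

-- ===== VERDICT =====
theorem spawn_food_spec : Claim_equal_spawn_food := by
  intro coords idx food fa ls v hdom hpre
  obtain ⟨hne, hlo, -⟩ := hpre
  unfold Spec_spawn_food
  have hlen : 0 < (coords.length : Int) := by
    cases coords with
    | nil => exact absurd rfl hne
    | cons a l => simp
  rw [spawn_food_alt]
  by_cases hge : idx ≥ (coords.length : Int)
  · have h1 : 0 ≤ PySem.Int.mod idx (coords.length : Int) := PySem.Int.mod_nonneg idx hlen
    have h2 : PySem.Int.mod idx (coords.length : Int) < (coords.length : Int) := PySem.Int.mod_lt idx hlen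
    have hwrap : spawn_food coords idx food fa ls v
        = spawn_food coords (PySem.Int.mod idx (coords.length : Int)) food fa ls v := by
      conv_lhs => rw [spawn_food]
      conv_rhs => rw [spawn_food]
      simp only [hge, hne, if_pos, if_neg (not_le.mpr h2), ne_eq, not_false_iff]
    rw [hwrap]
    have hr : (if idx ≥ (coords.length : Int) then (if coords ≠ [] then PySem.Int.mod idx (coords.length : Int) else 0) else idx) = PySem.Int.mod idx (coords.length : Int) := by
      rw [if_pos hge, if_pos hne]
    rw [hr]
    exact scan_eq coords food fa ls v _ _ le_rfl h2
  · have hr : (if idx ≥ (coords.length : Int) then (if coords ≠ [] then PySem.Int.mod idx (coords.length : Int) else 0) else idx) = idx := if_neg hge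
    rw [hr]
    exact scan_eq coords food fa ls v _ idx le_rfl (lt_of_not_ge hge)
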